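-- pv_equiv track=rewrite | github.com/JGW-JGW/LeetCodeLearning | 564. 寻找最近的回文数.py | calc_int
-- ===== SOURCE A (Python) =====
-- def calc_int(half_left_str: str, symmetric_flag: bool) -> int:
--     n = len(half_left_str)
--     result = 0
--     if symmetric_flag:
--         total_len = 2 * n
--         for i in range(n):
--             result += int(half_left_str[i]) * (10 ** i + 10 ** (total_len - i - 1))
--     else:
--         total_len = 2 * n - 1
--         for i in range(n - 1):
--             result += int(half_left_str[i]) * (10 ** i + 10 ** (total_len - i - 1))
--         result += int(half_left_str[n - 1]) * 10 ** (n - 1)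
--
--     return result
-- ===== SOURCE B (Python) =====
-- def calc_int(half_left_str: str, symmetric_flag: bool) -> int:
--     # Build the whole palindrome as a digit sequence, then evaluate it in one
--     # Horner pass instead of summing positional big-power terms.
--     if symmetric_flag:
--         s = half_left_str + half_left_str[::-1]
--     else:
--         s = half_left_str + half_left_str[:-1][::-1]
--     result = 0
--     for ch in s:
--         result = result * 10 + int(ch)
--     return result
-- ===== Notes on version B (the rewrite author's own statement) =====
-- stated objective: simpler
-- what changed: B builds the full palindrome digit string (left half plus its mirror) and evaluates it with a single Horner pass, instead of A's loop that adds one positional term int(d)*(10**i + 10**(L-i-1)) per index with two big-power computations each.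
import Mathlib
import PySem

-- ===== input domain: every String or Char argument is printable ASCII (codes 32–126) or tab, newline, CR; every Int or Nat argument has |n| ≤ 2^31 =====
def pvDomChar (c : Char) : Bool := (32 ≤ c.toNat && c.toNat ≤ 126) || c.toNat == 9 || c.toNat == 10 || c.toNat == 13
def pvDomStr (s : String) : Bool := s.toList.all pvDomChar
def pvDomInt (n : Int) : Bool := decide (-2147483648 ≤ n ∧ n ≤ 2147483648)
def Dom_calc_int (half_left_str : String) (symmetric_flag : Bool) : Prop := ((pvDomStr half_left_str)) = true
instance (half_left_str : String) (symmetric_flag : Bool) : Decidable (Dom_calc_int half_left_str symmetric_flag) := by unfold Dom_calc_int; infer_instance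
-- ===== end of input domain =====

-- B builds the whole palindrome digit sequence and evaluates it with one Horner pass,
-- instead of A's per-index sum of positional big-power terms; same return value on Pre_.


-- ===== PORT A =====
-- int(c) for a one-character string: exact when c is an ASCII digit; any other
-- character makes Python's int() raise ValueError, and Pre_calc_int excludes those inputs.
def pvDigit (c : Char) : Int := (c.toNat : Int) - 48

def calc_int (half_left_str : String) (symmetric_flag : Bool) : Int :=
  let cs := half_left_str.toList
  let n := cs.length
  if symmetric_flag then
    -- total_len = 2 * n; result += int(s[i]) * (10 ** i + 10 ** (total_len - i - 1))
    (List.range n).foldl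
      (fun result i => result + pvDigit (cs.getD i ' ') * ((10 : Int) ^ i + (10 : Int) ^ (2 * n - i - 1))) 0
  else
    -- total_len = 2 * n - 1; loop over range(n - 1), then the middle digit term
    ((List.range (n - 1)).foldl
      (fun result i => result + pvDigit (cs.getD i ' ') * ((10 : Int) ^ i + (10 : Int) ^ (2 * n - 1 - i - 1))) 0)
    + pvDigit (cs.getD (n - 1) ' ') * (10 : Int) ^ (n - 1)

-- ===== PORT B =====
def calc_int_alt (half_left_str : String) (symmetric_flag : Bool) : Int :=
  let cs := half_left_str.toList
  -- s = half + half[::-1]  /  s = half + half[:-1][::-1]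
  let full :=
    if symmetric_flag then cs ++ ((PySem.List.slice? cs none none (-1)).getD [])
    else cs ++ ((PySem.List.slice? (PySem.List.slice cs none (some (-1))) none none (-1)).getD [])
  -- result = 0; for ch in s: result = result * 10 + int(ch)
  full.foldl (fun result c => result * 10 + pvDigit c) 0

-- ===== PRECONDITION & SPEC =====
-- Pre_ excludes exactly the inputs where Python A raises: any non-digit character makes
-- int() raise ValueError, and the empty string with symmetric_flag False raises IndexError.
def Pre_calc_int (half_left_str : String) (symmetric_flag : Bool) : Prop :=
  (half_left_str.toList.all Char.isDigit) = true ∧ (symmetric_flag = false → half_left_str.toList ≠ [])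
instance (half_left_str : String) (symmetric_flag : Bool) : Decidable (Pre_calc_int half_left_str symmetric_flag) := by unfold Pre_calc_int; infer_instance

def pvWitness_calc_int : String × Bool := ("1", false)

def Spec_calc_int (half_left_str : String) (symmetric_flag : Bool) (out : Int) : Prop := out = calc_int_alt half_left_str symmetric_flag
instance (half_left_str : String) (symmetric_flag : Bool) (out : Int) : Decidable (Spec_calc_int half_left_str symmetric_flag out) := by unfold Spec_calc_int; infer_instance

-- ===== CLAIM (what is proved, stated in full; the proofs are below) =====
def Claim_equal_calc_int : Prop := ∀ (half_left_str : String) (symmetric_flag : Bool), Dom_calc_int half_left_str symmetric_flag → Pre_calc_int half_left_str symmetric_flag → Spec_calc_int half_left_str symmetric_flag (calc_int half_left_str symmetric_flag)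

-- ===== LEMMAS AND PROOFS =====

-- the Horner value of a digit sequence (B's loop, run from 0)
def pvVal (l : List Char) : Int := l.foldl (fun result c => result * 10 + pvDigit c) 0

-- the low-endian positional value Σ dᵢ·10^i (shape of A's 10^i terms)
def pvLow (l : List Char) : Int :=
  ∑ i ∈ Finset.range l.length, pvDigit (l.getD i ' ') * (10 : Int) ^ i

lemma pvVal_foldl (l : List Char) (a : Int) :
    l.foldl (fun result c => result * 10 + pvDigit c) a = a * 10 ^ l.length + pvVal l := by
  induction l generalizing a with
  | nil => simp [pvVal]
  | cons c t ih =>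
    simp only [List.foldl_cons, List.length_cons, pvVal]
    rw [ih, ih (0 * 10 + pvDigit c)]
    ring

lemma pvVal_append (l m : List Char) :
    pvVal (l ++ m) = pvVal l * 10 ^ m.length + pvVal m := by
  rw [pvVal, List.foldl_append, pvVal_foldl]
  rfl

lemma pvVal_reverse (l : List Char) : pvVal l.reverse = pvLow l := by
  induction l with
  | nil => simp [pvVal, pvLow]
  | cons c t ih =>
    rw [List.reverse_cons, pvVal_append]
    have hl : pvLow (c :: t) = pvDigit c + pvLow t * 10 := by
      simp only [pvLow, List.length_cons, Finset.sum_range_succ', List.getD_cons_succ,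
        List.getD_cons_zero, pow_succ, pow_zero, ← mul_assoc]
      rw [← Finset.sum_mul]
      ring
    rw [hl, ← ih]
    simp only [List.length_cons, List.length_nil, pvVal, List.foldl_cons, List.foldl_nil]
    ring

lemma pvVal_eq_high (l : List Char) :
    pvVal l = ∑ i ∈ Finset.range l.length, pvDigit (l.getD i ' ') * (10 : Int) ^ (l.length - 1 - i) := by
  have h := pvVal_reverse l.reverse
  rw [List.reverse_reverse] at h
  rw [h, pvLow, List.length_reverse]
  rw [← Finset.sum_range_reflect]
  refine Finset.sum_congr rfl ?_
  intro i hi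
  rw [Finset.mem_range] at hi
  have hidx : l.reverse.getD (l.length - 1 - i) ' ' = l.getD i ' ' := by
    have h1 : l.length - 1 - i < l.reverse.length := by simp; omega
    have h2 : i < l.length := hi
    rw [List.getD_eq_getElem _ _ h1, List.getD_eq_getElem _ _ h2, List.getElem_reverse]
    congr 1
    omega
  rw [hidx]

-- A's symmetric loop as a closed sum
lemma pvA_sum (g : Nat → Int) (n : Nat) :
    (List.range n).foldl (fun result i => result + g i) 0 = ∑ i ∈ Finset.range n, g i := by
  induction n with
  | zero => simp
  | succ k ih => rw [List.range_succ, List.foldl_append, ih, Finset.sum_range_succ]; simp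

lemma pvB_slices (cs : List Char) :
    ((PySem.List.slice? cs none none (-1)).getD []) = cs.reverse ∧
    PySem.List.slice cs none (some (-1)) = cs.dropLast := by
  constructor
  · rw [PySem.List.slice?_none_none_neg_one]; rfl
  · exact PySem.List.slice_to_neg_one cs

-- ===== VERDICT (by name: the statement is the Claim_ definition above) =====
theorem calc_int_spec : Claim_equal_calc_int := by
  intro s flag _ hPre
  unfold Spec_calc_int calc_int calc_int_alt
  cases flag with
  | true =>
    simp only [if_true, PySem.List.slice?_none_none_neg_one, Option.getD_some]
    rw [pvA_sum]
    have hB : (s.toList ++ s.toList.reverse).foldl (fun result c => result * 10 + pvDigit c) 0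
        = pvVal s.toList * 10 ^ s.toList.length + pvLow s.toList := by
      show pvVal (s.toList ++ s.toList.reverse) = _
      rw [pvVal_append, pvVal_reverse, List.length_reverse]
    rw [hB]
    have hsplit : ∀ i ∈ Finset.range s.toList.length,
        pvDigit (s.toList.getD i ' ') * ((10:Int) ^ i + 10 ^ (2 * s.toList.length - i - 1))
        = pvDigit (s.toList.getD i ' ') * 10 ^ i
          + pvDigit (s.toList.getD i ' ') * 10 ^ (s.toList.length - 1 - i) * 10 ^ s.toList.length := by
      intro i hi
      rw [Finset.mem_range] at hi
      rw [mul_add, mul_assoc, ← pow_add]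
      congr 3
      omega
    rw [Finset.sum_congr rfl hsplit, Finset.sum_add_distrib, ← Finset.sum_mul,
      ← pvVal_eq_high, ← pvLow]
    ring
  | false =>
    rcases List.eq_nil_or_concat s.toList with hnil | ⟨u, c, hcat⟩
    · exact absurd hnil (hPre.2 rfl)
    rw [List.concat_eq_append] at hcat
    simp only [Bool.false_eq_true, if_false, PySem.List.slice?_none_none_neg_one,
      (pvB_slices _).2, Option.getD_some, hcat]
    have hlen : (u ++ [c]).length = u.length + 1 := by simp
    rw [hlen]
    simp only [Nat.add_sub_cancel, List.dropLast_concat]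
    have hgetLast : (u ++ [c]).getD u.length ' ' = c := by
      rw [List.getD_eq_getElem _ _ (by simp)]
      simp
    have hgetD : ∀ i ∈ Finset.range u.length,
        pvDigit ((u ++ [c]).getD i ' ') * ((10:Int) ^ i + 10 ^ (2 * (u.length + 1) - 1 - i - 1))
        = pvDigit (u.getD i ' ') * 10 ^ i
          + pvDigit (u.getD i ' ') * 10 ^ (u.length - 1 - i) * 10 ^ (u.length + 1) := by
      intro i hi
      rw [Finset.mem_range] at hi
      rw [List.getD_append _ _ _ _ hi, mul_add, mul_assoc, ← pow_add]
      congr 3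
      omega
    rw [pvA_sum, Finset.sum_congr rfl hgetD, Finset.sum_add_distrib, ← Finset.sum_mul,
      ← pvVal_eq_high, ← pvLow, hgetLast]
    have hB : ((u ++ [c]) ++ u.reverse).foldl (fun result c => result * 10 + pvDigit c) 0
        = (pvVal u * 10 + pvDigit c) * 10 ^ u.length + pvLow u := by
      show pvVal ((u ++ [c]) ++ u.reverse) = _
      rw [pvVal_append, pvVal_append, pvVal_reverse, List.length_reverse]
      simp only [pvVal, List.length_cons, List.length_nil, List.foldl_cons, List.foldl_nil]
      ring
    rw [hB]
    ring
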